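-- pv_equiv track=rewrite | github.com/sugan0tech/Projects | programming/python/ismail/conditiona statement.py | strange_sum
-- ===== SOURCE A (Python) =====
-- def strange_sum(L, R):
--     def prime(n):
--         i = 2
--         num = n
--         while i < num:
--             if num % i == 0:
--                 return False
--                 break
--             else:
--                 i = i + 1
--
--         else:
--             return True
--
--     def factors(num):
--         list2 = []
--         n = num
--         for i in range(n):
--             if n % (i + 1) == 0:
--                 list2.append(i + 1)
--         return list2
--
--     def two_val(var1):
--         list3 = factors(var1)
--         list3.remove(var1)
--         for i in list3:
--             for j in list3:
--                 if i * j == var1: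
--                     temp = []
--                     if i <= j:
--                         temp.append(i)
--                         temp.append(j)
--                         return tuple(temp)
--
--     def check(var):
--         if var == 1:
--             return 0
--         elif prime(var) == True:
--             return 1
--         else:
--             x, y = two_val(var)
--             res = x * check(y) + y * check(x)
--             return res
--
--     t = 0
--     for i in range(L, R + 1):
--         list1 = factors(i)
--         s = 0
--         for j in list1:
--             s += int(check(j))
--         t += s
--     return t
-- ===== SOURCE B (Python) =====
-- def strange_sum(L, R):
--     # check(n) in A is the arithmetic derivative: D(1)=0, D(p)=1, D(ab)=a*D(b)+b*D(a).
--     # Compute it directly by peeling the smallest factor found by sqrt-bounded trial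
--     # division, and enumerate divisors of each i in divisor pairs up to sqrt(i).
--     def deriv(n):
--         if n <= 1:
--             return 0
--         p = 2
--         while p * p <= n and n % p != 0:
--             p += 1
--         if p * p > n:
--             return 1  # n is prime
--         return n // p + p * deriv(n // p)
--
--     t = 0
--     for i in range(max(L, 1), R + 1):
--         d = 1
--         while d * d <= i:
--             if i % d == 0:
--                 t += deriv(d)
--                 if d != i // d:
--                     t += deriv(i // d)
--             d += 1
--     return t
-- ===== Notes on version B (the rewrite author's own statement) =====
-- stated objective: faster
-- what changed: A's recursive check() is the arithmetic derivative: B computes it directly by sqrt-bounded trial division (peeling the smallest prime factor) and sums it over each i's divisors enumerated in pairs d, i//d up to sqrt(i), replacing A's full-range factor scans, linear primality loops and quadratic two_val divisor-pair search.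
import Mathlib
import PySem

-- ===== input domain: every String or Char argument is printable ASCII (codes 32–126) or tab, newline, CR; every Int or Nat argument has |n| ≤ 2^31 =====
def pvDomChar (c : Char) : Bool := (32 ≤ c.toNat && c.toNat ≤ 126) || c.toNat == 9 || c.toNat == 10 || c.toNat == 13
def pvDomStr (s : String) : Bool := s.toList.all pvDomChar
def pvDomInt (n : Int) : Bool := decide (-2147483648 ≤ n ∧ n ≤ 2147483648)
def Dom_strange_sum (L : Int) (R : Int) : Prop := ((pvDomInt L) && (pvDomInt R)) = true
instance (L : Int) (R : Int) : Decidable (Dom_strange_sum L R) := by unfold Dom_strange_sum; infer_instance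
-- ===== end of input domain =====

-- B recomputes A's recursive `check` (the arithmetic derivative) by sqrt-bounded trial
-- division and enumerates each i's divisors in pairs up to sqrt(i), instead of A's full
-- range scans; same return value for every input, A and B are both pure.

-- ===== PORT A =====

-- prime(n): `while i < num: ...` — recursion on the distance num - i
def primeGoA (i num : Int) : Bool :=
  if _h : i < num then
    (if PySem.Int.mod num i == 0 then false else primeGoA (i + 1) num)
  else true
termination_by (num - i).toNat
decreasing_by omega

def primeA (n : Int) : Bool := primeGoA 2 n

-- factors(num): for i in range(n): if n % (i+1) == 0: list2.append(i+1)
def factorsA (num : Int) : List Int :=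
  (PySem.List.pyRange 0 num 1).foldl
    (fun acc i => if PySem.Int.mod num (i + 1) == 0 then acc ++ [i + 1] else acc) []

-- two_val(var1): list3.remove raises ValueError if var1 absent, and `x, y = two_val(var)`
-- raises TypeError when two_val returns None; both exceptional paths are `none` here
-- (neither is reachable from strange_sum, which the proof establishes).
def twoValA (var1 : Int) : Option (Int × Int) :=
  match PySem.List.remove? (factorsA var1) var1 with
  | none => none
  | some list3 =>
      list3.findSome? (fun i => list3.findSome? (fun j =>
        if i * j == var1 then (if i ≤ j then some (i, j) else none) else none))

-- check(var): recursive; fuel is only a termination device (the recursive arguments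
-- strictly decrease, so fuel = var suffices — proved below), `none` = a raised exception.
def checkA : Nat → Int → Option Int
  | 0, _ => none
  | fuel + 1, var =>
    if var == 1 then some 0
    else if primeA var == true then some 1
    else
      match twoValA var with
      | none => none
      | some (x, y) =>
          match checkA fuel y, checkA fuel x with
          | some cy, some cx => some (x * cy + y * cx)
          | _, _ => none

def strange_sum (L : Int) (R : Int) : Int :=
  ((PySem.List.pyRange L (R + 1) 1).foldl
    (fun t i =>
      match t with
      | none => none
      | some tv =>
          match (factorsA i).foldl
              (fun s j =>
                match s with
                | none => none
                | some sv =>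
                    match checkA j.toNat j with
                    | none => none
                    | some c => some (sv + c)) (some (0 : Int)) with
          | none => none
          | some sv => some (tv + sv)) (some (0 : Int))).getD 0

-- ===== PORT B =====

-- while p * p <= n and n % p != 0: p += 1
def findPB (n p : Int) : Int :=
  if h : p * p ≤ n ∧ ¬(PySem.Int.mod n p == 0) then findPB n (p + 1) else p
termination_by (n + 1 - p).toNat
decreasing_by
  have hn : 0 ≤ n := le_trans (mul_self_nonneg p) h.1
  rcases (by omega : p ≤ 0 ∨ 1 ≤ p) with hp | hp
  · omega
  · have : p ≤ p * p := le_mul_of_one_le_left (by omega) (by omega)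
    omega

-- needed by derivB's termination: findPB never returns less than its start
theorem findPB_ge (n : Int) : ∀ p, p ≤ findPB n p := by
  intro p
  induction p using findPB.induct n with
  | case1 p h ih => rw [findPB, dif_pos h]; omega
  | case2 p h => rw [findPB, dif_neg h]

def derivB (n : Int) : Int :=
  if _h1 : n ≤ 1 then 0
  else
    let p := findPB n 2
    if _h2 : n < p * p then 1
    else PySem.Int.floordiv n p + p * derivB (PySem.Int.floordiv n p)
termination_by n.toNat
decreasing_by
  have hp : 2 ≤ findPB n 2 := findPB_ge n 2
  have h1 : PySem.Int.floordiv n (findPB n 2) = n / findPB n 2 :=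
    PySem.Int.floordiv_eq_ediv_of_pos (by omega)
  have h3 : 0 ≤ n / findPB n 2 := Int.ediv_nonneg (by omega) (by omega)
  have h4 : n / findPB n 2 * findPB n 2 ≤ n := Int.ediv_mul_le n (by omega)
  have h5 : n / findPB n 2 * 2 ≤ n / findPB n 2 * findPB n 2 :=
    mul_le_mul_of_nonneg_left (by omega) h3
  simp only [h1]
  omega

-- while d * d <= i: if i % d == 0: t += deriv(d); if d != i // d: t += deriv(i // d); d += 1
def divLoopB (i d t : Int) : Int :=
  if h : d * d ≤ i then
    divLoopB i (d + 1)
      (if PySem.Int.mod i d == 0 then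
        (if d ≠ PySem.Int.floordiv i d
          then t + derivB d + derivB (PySem.Int.floordiv i d)
          else t + derivB d)
       else t)
  else t
termination_by (i + 1 - d).toNat
decreasing_by
  have hn : 0 ≤ i := le_trans (mul_self_nonneg d) h
  rcases (by omega : d ≤ 0 ∨ 1 ≤ d) with hp | hp
  · omega
  · have : d ≤ d * d := le_mul_of_one_le_left (by omega) (by omega)
    omega

def strange_sum_alt (L : Int) (R : Int) : Int :=
  (PySem.List.pyRange (max L 1) (R + 1) 1).foldl (fun t i => divLoopB i 1 t) 0

-- ===== PRECONDITION & SPEC =====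
def Spec_strange_sum (L : Int) (R : Int) (out : Int) : Prop := out = strange_sum_alt L R
instance (L : Int) (R : Int) (out : Int) : Decidable (Spec_strange_sum L R out) := by unfold Spec_strange_sum; infer_instance

-- ===== CLAIM (what is proved, stated in full; the proofs are below) =====
def Claim_equal_strange_sum : Prop := ∀ (L : Int) (R : Int), Dom_strange_sum L R → Spec_strange_sum L R (strange_sum L R)

-- ===== LEMMAS AND PROOFS =====

-- The arithmetic derivative: D 1 = 0, D p = 1 for prime p, D (a*b) = a * D b + b * D a.
-- Both A's `check` and B's `deriv` compute this function; it is the proof's common spec.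
def DD (n : Nat) : Int :=
  if _h : n ≤ 1 then 0
  else ((n / n.minFac : Nat) : Int) + ((n.minFac : Nat) : Int) * DD (n / n.minFac)
termination_by n
decreasing_by
  have h2 : 2 ≤ n.minFac := (Nat.minFac_prime (by omega)).two_le
  exact Nat.div_lt_self (by omega) (by omega)

-- ===== generic findSome? helpers =====
theorem findSome?_filter {α β : Type} (p : α → Bool) (f : α → Option β) (l : List α) :
    (l.filter p).findSome? f = l.findSome? (fun x => if p x then f x else none) := by
  induction l with
  | nil => rfl
  | cons a t ih =>
      by_cases h : p a = true
      · simp [List.filter_cons, h, List.findSome?_cons, ih]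
      · simp [List.filter_cons, h, List.findSome?_cons, ih]

theorem findSome?_eq_of_unique {β : Type} (g : Int → Option β) (l : List Int) (a : Int)
    (ha : a ∈ l) (h : ∀ x ∈ l, x ≠ a → g x = none) : l.findSome? g = g a := by
  induction l with
  | nil => cases ha
  | cons x t ih =>
      rcases eq_or_ne x a with rfl | hx
      · rw [List.findSome?_cons]
        cases hg : g x with
        | some b => rfl
        | none =>
            simp only []
            by_cases hm : x ∈ t
            · exact (ih hm (fun y hy hne => h y (List.mem_cons_of_mem _ hy) hne)).trans hg
            · rw [List.findSome?_eq_none_iff.2 (fun y hy => h y (List.mem_cons_of_mem _ hy) (fun hc => hm (hc ▸ hy)))]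
      · rw [List.findSome?_cons, h x (List.mem_cons_self) hx]
        have ha' : a ∈ t := by
          rcases List.mem_cons.1 ha with hc | hc
          · exact absurd hc.symm hx
          · exact hc
        exact ih ha' (fun y hy => h y (List.mem_cons_of_mem _ hy))

theorem findSome?_eq_of_none {β : Type} (g : Int → Option β) (l : List Int)
    (h : ∀ x ∈ l, g x = none) : l.findSome? g = none := List.findSome?_eq_none_iff.2 h

theorem findSome?_range_first {β : Type} (h : Nat → Option β) (m k0 : Nat) (b : β)
    (hk : k0 < m) (hnone : ∀ k, k < k0 → h k = none) (hval : h k0 = some b) :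
    (List.range m).findSome? h = some b := by
  have hm : m = k0 + (m - k0) := by omega
  rw [hm, List.range_add, List.findSome?_append,
      List.findSome?_eq_none_iff.2 (fun y hy => hnone y (List.mem_range.1 hy)), Option.none_or]
  obtain ⟨r, hr⟩ : ∃ r, m - k0 = r + 1 := ⟨m - k0 - 1, by omega⟩
  rw [hr, List.range_succ_eq_map]
  simp [List.findSome?_cons, hval]

-- ===== prime =====
theorem primeGoA_spec (num : Int) : ∀ i : Int,
    (primeGoA i num = true ↔ ∀ d : Int, i ≤ d → d < num → ¬ d ∣ num) := by
  intro i
  induction i using primeGoA.induct num with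
  | case1 i hlt hmod =>
      rw [primeGoA, dif_pos hlt, if_pos hmod]
      constructor
      · intro h; exact absurd h (by simp)
      · intro h
        exact absurd (by simpa [beq_iff_eq, PySem.Int.mod_eq_zero_iff_dvd] using hmod)
          (h i (le_refl i) hlt)
  | case2 i hlt hmod ih =>
      rw [primeGoA, dif_pos hlt, if_neg hmod]
      constructor
      · intro h d hid hdn
        rcases eq_or_lt_of_le hid with rfl | hid'
        · intro hdvd
          exact hmod (by simpa [beq_iff_eq, PySem.Int.mod_eq_zero_iff_dvd] using hdvd)
        · exact (ih.1 h) d (by omega) hdn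
      · intro h
        exact ih.2 (fun d hid hdn => h d (by omega) hdn)
  | case3 i hlt =>
      rw [primeGoA, dif_neg hlt]
      simp only [true_iff]
      intro d hid hdn
      omega

theorem primeA_iff (n : Nat) (hn : 2 ≤ n) : primeA (n : Int) = true ↔ n.Prime := by
  rw [primeA, primeGoA_spec, Nat.prime_def_lt']
  constructor
  · intro h
    refine ⟨hn, fun m h2 hlt hdvd => h (m : Int) (by exact_mod_cast h2) (by exact_mod_cast hlt) ?_⟩
    exact_mod_cast Int.natCast_dvd_natCast.2 hdvd
  · intro h d h2 hlt hdvd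
    have hd : d = ((d.toNat : Nat) : Int) := by omega
    refine h.2 d.toNat (by omega) (by omega) ?_
    rw [← Int.natCast_dvd_natCast]
    exact hd ▸ hdvd

-- ===== factors =====
theorem factorsA_natCast (n : Nat) :
    factorsA (n : Int) =
      ((List.range n).filter (fun k => decide ((k + 1) ∣ n))).map (fun k => ((k + 1 : Nat) : Int)) := by
  rw [factorsA, PySem.List.pyRange_zero_natCast,
      PySem.List.foldl_append_if (fun i => PySem.Int.mod (n : Int) (i + 1) == 0) (fun i => i + 1),
      List.nil_append, List.filter_map, List.map_map]
  have hf : List.filter ((fun i => PySem.Int.mod (n : Int) (i + 1) == 0) ∘ (fun k : Nat => (k : Int)))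
      (List.range n) = List.filter (fun k => decide ((k + 1) ∣ n)) (List.range n) := by
    apply List.filter_congr
    intro k _
    simp only [Function.comp]
    rw [Bool.eq_iff_iff]
    simp only [beq_iff_eq, decide_eq_true_eq, PySem.Int.mod_eq_zero_iff_dvd]
    exact_mod_cast Iff.rfl
  rw [hf]
  apply List.map_congr_left
  intro k _
  simp only [Function.comp]
  push_cast; ring

theorem factorsA_nonpos (i : Int) (hi : i ≤ 0) : factorsA i = [] := by
  rw [factorsA, PySem.List.pyRange_one_eq_nil hi]
  rfl

-- the truncated divisor list two_val iterates over
def dl3 (n : Nat) : List Int :=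
  ((List.range (n - 1)).filter (fun k => decide ((k + 1) ∣ n))).map (fun k => ((k + 1 : Nat) : Int))

theorem mem_dl3 (n : Nat) (x : Int) :
    x ∈ dl3 n ↔ ∃ q : Nat, x = (q : Int) ∧ 1 ≤ q ∧ q < n ∧ q ∣ n := by
  simp only [dl3, List.mem_map, List.mem_filter, List.mem_range, decide_eq_true_eq]
  constructor
  · rintro ⟨k, ⟨hk, hdvd⟩, rfl⟩
    exact ⟨k + 1, rfl, by omega, by omega, hdvd⟩
  · rintro ⟨q, rfl, h1, h2, h3⟩
    exact ⟨q - 1, ⟨by omega, by simpa [Nat.sub_add_cancel h1] using h3⟩, by rw [Nat.sub_add_cancel h1]⟩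

theorem remove_factorsA (n : Nat) (hn : 1 ≤ n) :
    PySem.List.remove? (factorsA (n : Int)) (n : Int) = some (dl3 n) := by
  have hsplit : List.range n = List.range (n - 1) ++ [n - 1] := by
    conv_lhs => rw [show n = (n - 1) + 1 by omega]
    rw [List.range_succ]
  have hlast : decide ((n - 1 + 1) ∣ n) = true := by
    simp only [decide_eq_true_eq]
    rw [Nat.sub_add_cancel hn]
  rw [factorsA_natCast, hsplit, List.filter_append, List.map_append]
  simp only [List.filter_cons, List.filter_nil, hlast, if_true, List.map_cons, List.map_nil,
    Nat.sub_add_cancel hn]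
  have hnotmem : (n : Int) ∉ ((List.range (n - 1)).filter (fun k => decide ((k + 1) ∣ n))).map
      (fun k => ((k + 1 : Nat) : Int)) := by
    simp only [List.mem_map, List.mem_filter, List.mem_range, not_exists]
    rintro k ⟨⟨hk, _⟩, hek⟩
    have : k + 1 = n := by exact_mod_cast hek
    omega
  have hcast : ((n - 1 : Nat) : Int) + 1 = (n : Int) := by omega
  rw [PySem.List.remove?_eq_some_erase _ _ (by simp [hcast]),
      List.erase_append_right _ hnotmem]
  simp [dl3, hcast]

-- ===== two_val =====
def Fout (n : Nat) (i : Int) : Option (Int × Int) :=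
  (dl3 n).findSome? (fun j => if i * j == (n : Int) then (if i ≤ j then some (i, j) else none) else none)

theorem Fout_one (n : Nat) : Fout n 1 = none := by
  apply findSome?_eq_of_none
  intro x hx
  rcases (mem_dl3 n x).1 hx with ⟨m, rfl, h1, h2, h3⟩
  have : (1 * (m : Int) == (n : Int)) = false := by
    simp only [one_mul, beq_eq_false_iff_ne, ne_eq]
    intro hc
    have : m = n := by exact_mod_cast hc
    omega
  rw [this]
  rfl

theorem Fout_dvd (n q : Nat) (h1 : 2 ≤ q) (hd : q ∣ n) (hn : 2 ≤ n) (hq : q ≤ n / q)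
    (hlt : n / q < n) :
    Fout n (q : Int) = some ((q : Int), ((n / q : Nat) : Int)) := by
  have hdl : ((n / q : Nat) : Int) ∈ dl3 n := by
    rw [mem_dl3]
    exact ⟨n / q, rfl, by omega, hlt, Nat.div_dvd_of_dvd hd⟩
  rw [Fout, findSome?_eq_of_unique _ _ _ hdl]
  · have hmul : (q : Int) * ((n / q : Nat) : Int) = (n : Int) := by
      rw [← Nat.cast_mul, Nat.mul_div_cancel' hd]
    rw [hmul]
    simp only [beq_self_eq_true, if_true]
    rw [if_pos (by exact_mod_cast hq)]
  · intro x hx hne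
    rcases (mem_dl3 n x).1 hx with ⟨m, rfl, hm1, hm2, hm3⟩
    have : ((q : Int) * (m : Int) == (n : Int)) = false := by
      simp only [beq_eq_false_iff_ne, ne_eq, ← Nat.cast_mul]
      intro hc
      have hqm : q * m = n := by exact_mod_cast hc
      have : m = n / q := by
        rw [← hqm, Nat.mul_div_cancel_left _ (by omega)]
      exact hne (by rw [this])
    rw [this]
    rfl

theorem twoValA_spec (n : Nat) (hn : 2 ≤ n) (hnp : ¬ n.Prime) :
    twoValA (n : Int) = some ((n.minFac : Int), ((n / n.minFac : Nat) : Int)) := by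
  have pp : n.minFac.Prime := Nat.minFac_prime (by omega)
  have hp2 : 2 ≤ n.minFac := pp.two_le
  have hpd : n.minFac ∣ n := Nat.minFac_dvd n
  have hple : n.minFac ≤ n / n.minFac := Nat.minFac_le_div (by omega) hnp
  have hpn : n.minFac ≠ n := fun hc => hnp (hc ▸ pp)
  have hplt : n.minFac < n := lt_of_le_of_ne (Nat.le_of_dvd (by omega) hpd) hpn
  have hdlt : n / n.minFac < n := Nat.div_lt_self (by omega) (by omega)
  rw [twoValA, remove_factorsA n (by omega)]
  simp only []
  -- convert the outer scan over dl3 into a scan over List.range (n-1)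
  rw [show (dl3 n).findSome? (fun i => (dl3 n).findSome? (fun j =>
        if i * j == (n : Int) then (if i ≤ j then some (i, j) else none) else none)) =
      (dl3 n).findSome? (fun i => Fout n i) from rfl]
  rw [dl3, List.findSome?_map, findSome?_filter]
  apply findSome?_range_first _ _ (n.minFac - 1)
  · omega
  · intro k hk
    simp only [Function.comp]
    by_cases hdvd : (k + 1) ∣ n
    · rw [if_pos (by simpa using hdvd)]
      have hk1 : k + 1 = 1 := by
        by_contra hne
        have := Nat.minFac_le_of_dvd (by omega) hdvd
        omega
      rw [hk1]
      exact_mod_cast Fout_one n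
    · rw [if_neg (by simpa using hdvd)]
  · simp only [Function.comp]
    rw [if_pos (by simp [Nat.sub_add_cancel (by omega : 1 ≤ n.minFac)] ; exact hpd)]
    rw [show n.minFac - 1 + 1 = n.minFac by omega]
    exact Fout_dvd n n.minFac hp2 hpd hn hple hdlt

-- ===== check = DD =====
theorem DD_one : DD 1 = 0 := by rw [DD]; simp

theorem DD_prime (p : Nat) (hp : p.Prime) : DD p = 1 := by
  have h2 := hp.two_le
  rw [DD, dif_neg (by omega : ¬ p ≤ 1)]
  rw [hp.minFac_eq, Nat.div_self (by omega : 0 < p), DD_one]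
  ring

theorem checkA_spec : ∀ (f : Nat) (n : Nat), 1 ≤ n → n ≤ f → checkA f (n : Int) = some (DD n) := by
  intro f
  induction f with
  | zero => intro n h1 h2; omega
  | succ f ih =>
      intro n h1 h2
      rcases eq_or_lt_of_le h1 with rfl | hn2
      · rw [checkA]
        norm_num [DD_one]
      · have hn : 2 ≤ n := hn2
        rw [checkA]
        rw [if_neg (by simp; omega)]
        by_cases hp : n.Prime
        · rw [if_pos (by simp [(primeA_iff n hn).2 hp])]
          rw [DD_prime n hp]
        · rw [if_neg (by simp [hp, primeA_iff n hn])]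
          have pp : n.minFac.Prime := Nat.minFac_prime (by omega)
          have hp2 : 2 ≤ n.minFac := pp.two_le
          have hpd : n.minFac ∣ n := Nat.minFac_dvd n
          have hplt : n.minFac < n :=
            lt_of_le_of_ne (Nat.le_of_dvd (by omega) hpd) (fun hc => hp (hc ▸ pp))
          have hdlt : n / n.minFac < n := Nat.div_lt_self (by omega) (by omega)
          have hdge : 1 ≤ n / n.minFac := Nat.one_le_div_iff (by omega) |>.2 (Nat.le_of_dvd (by omega) hpd)
          rw [twoValA_spec n hn hp]
          dsimp only
          rw [ih (n / n.minFac) hdge (by omega), ih n.minFac (by omega) (by omega)]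
          dsimp only
          rw [DD_prime n.minFac pp]
          conv_rhs => rw [DD]
          rw [dif_neg (by omega : ¬ n ≤ 1)]
          rw [Option.some_inj]
          ring

-- ===== B side: findPB / derivB = DD =====
theorem findPB_spec (n : Int) : ∀ p : Int,
    p ≤ findPB n p ∧
    (n < findPB n p * findPB n p ∨ PySem.Int.mod n (findPB n p) = 0) ∧
    (∀ r, p ≤ r → r < findPB n p → r * r ≤ n ∧ ¬ PySem.Int.mod n r = 0) := by
  intro p
  induction p using findPB.induct n with
  | case1 p h ih =>
      rw [findPB, dif_pos h]
      refine ⟨by have := ih.1; omega, ih.2.1, ?_⟩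
      intro r hpr hlt
      rcases eq_or_lt_of_le hpr with rfl | hlt'
      · exact ⟨h.1, by simpa using h.2⟩
      · exact ih.2.2 r (by omega) hlt
  | case2 p h =>
      rw [findPB, dif_neg h]
      refine ⟨le_refl p, ?_, fun r h1 h2 => by omega⟩
      by_cases hle : p * p ≤ n
      · right
        have := (not_and.1 h) hle
        simpa [beq_iff_eq] using this
      · left; omega

theorem derivB_spec : ∀ n : Nat, derivB (n : Int) = DD n := by
  intro n
  induction n using Nat.strong_induction_on with
  | _ n ih =>
      by_cases h1 : n ≤ 1
      · rw [derivB, dif_pos (by exact_mod_cast h1), DD, dif_pos h1]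
      · have hn : 2 ≤ n := by omega
        rw [derivB, dif_neg (by exact_mod_cast h1)]
        obtain ⟨hge, hpost, hrange⟩ := findPB_spec (n : Int) 2
        set q := findPB (n : Int) 2 with hq
        by_cases hp : n.Prime
        · have hlt : (n : Int) < q * q := by
            rcases hpost with h | h
            · exact h
            · have hdvd : q ∣ (n : Int) := (PySem.Int.mod_eq_zero_iff_dvd _ _).1 h
              have hqn : q.toNat ∣ n := by
                rw [← Int.natCast_dvd_natCast]
                have hcast : q = ((q.toNat : Nat) : Int) := by omega
                exact hcast ▸ hdvd
              have := (Nat.Prime.eq_one_or_self_of_dvd hp q.toNat hqn).resolve_left (by omega)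
              have hqq : q = (n : Int) := by omega
              rw [hqq]
              nlinarith [hn]
          rw [dif_pos hlt, DD_prime n hp]
        · -- composite: q = minFac n
          have pp : n.minFac.Prime := Nat.minFac_prime (by omega)
          have hm2 : 2 ≤ n.minFac := pp.two_le
          have hmd : n.minFac ∣ n := Nat.minFac_dvd n
          have hmle : n.minFac ≤ n / n.minFac := Nat.minFac_le_div (by omega) hp
          have hmsq : n.minFac * n.minFac ≤ n := by
            calc n.minFac * n.minFac ≤ n.minFac * (n / n.minFac) :=
                  Nat.mul_le_mul_left _ hmle
            _ = n := Nat.mul_div_cancel' hmd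
          have hqle : q ≤ (n.minFac : Int) := by
            by_contra hc
            push_neg at hc
            have := (hrange (n.minFac : Int) (by exact_mod_cast hm2) hc).2
            exact this ((PySem.Int.mod_eq_zero_iff_dvd _ _).2 (Int.natCast_dvd_natCast.2 hmd))
          have hqge : (n.minFac : Int) ≤ q := by
            by_contra hc
            push_neg at hc
            have hq2 : 2 ≤ q := hge
            rcases hpost with h | h
            · have : q * q < (n.minFac : Int) * (n.minFac : Int) := by nlinarith
              have hcast : ((n.minFac * n.minFac : Nat) : Int) ≤ (n : Int) := by exact_mod_cast hmsq
              push_cast at hcast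
              omega
            · have hdvd : q ∣ (n : Int) := (PySem.Int.mod_eq_zero_iff_dvd _ _).1 h
              have hqn : q.toNat ∣ n := by
                rw [← Int.natCast_dvd_natCast]
                have : q = ((q.toNat : Nat) : Int) := by omega
                exact this ▸ hdvd
              have := Nat.minFac_le_of_dvd (by omega) hqn
              omega
          have hqeq : q = (n.minFac : Int) := le_antisymm hqle hqge
          have hnlt : ¬ ((n : Int) < q * q) := by
            rw [hqeq]
            have : ((n.minFac * n.minFac : Nat) : Int) ≤ (n : Int) := by exact_mod_cast hmsq
            push_cast at this
            omega
          rw [dif_neg hnlt, hqeq]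
          have hfd : PySem.Int.floordiv (n : Int) (n.minFac : Int) = ((n / n.minFac : Nat) : Int) :=
            PySem.Int.floordiv_natCast n n.minFac
          rw [hfd, ih (n / n.minFac) (Nat.div_lt_self (by omega) (by omega))]
          conv_rhs => rw [DD]
          rw [dif_neg h1]

-- ===== B side: the divisor-pair loop as a Finset sum =====
def bodyB (n k : Nat) : Int :=
  if k ∣ n then (DD k + if k ≠ n / k then DD (n / k) else 0) else 0

theorem divLoopB_spec (n : Nat) :
    ∀ (m : Nat) (d : Int), (↑n + 1 - d).toNat = m → 1 ≤ d → ∀ t : Int,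
      divLoopB (n : Int) d t = t + ∑ k ∈ Finset.Ico d.toNat (n.sqrt + 1), bodyB n k := by
  intro m
  induction m using Nat.strong_induction_on with
  | _ m ih =>
      intro d hm hd t
      by_cases h : d * d ≤ (n : Int)
      · rw [divLoopB, dif_pos h]
        have hdn : d.toNat * d.toNat ≤ n := by
          have hcast0 : ((d.toNat : Nat) : Int) = d := by omega
          have h2 : ((d.toNat * d.toNat : Nat) : Int) ≤ ((n : Nat) : Int) := by
            push_cast; rw [hcast0]; exact h
          exact_mod_cast h2
        have hsq : d.toNat ≤ n.sqrt := Nat.le_sqrt.2 hdn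
        have hdlen : d ≤ (n : Int) := by nlinarith
        rw [ih ((↑n + 1 - (d + 1)).toNat) (by omega) (d + 1) rfl (by omega)]
        rw [Finset.sum_eq_sum_Ico_succ_bot (by omega : d.toNat < n.sqrt + 1)]
        have htn : (d + 1).toNat = d.toNat + 1 := by omega
        rw [htn]
        have hcast : ((d.toNat : Nat) : Int) = d := by omega
        -- the one-step body equals bodyB n d.toNat
        have hbody : (if PySem.Int.mod (n : Int) d == 0 then
              (if d ≠ PySem.Int.floordiv (n : Int) d
                then t + derivB d + derivB (PySem.Int.floordiv (n : Int) d)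
                else t + derivB d)
              else t) = t + bodyB n d.toNat := by
          by_cases hdvd : d.toNat ∣ n
          · have hmod : (PySem.Int.mod (n : Int) d == 0) = true := by
              simp only [beq_iff_eq]
              exact (PySem.Int.mod_eq_zero_iff_dvd _ _).2 (hcast ▸ Int.natCast_dvd_natCast.2 hdvd)
            have hfd : PySem.Int.floordiv (n : Int) d = ((n / d.toNat : Nat) : Int) := by
              rw [← hcast]; exact PySem.Int.floordiv_natCast n d.toNat
            rw [hmod, if_pos rfl, hfd]
            have hder1 : derivB d = DD d.toNat := by rw [← hcast]; exact derivB_spec d.toNat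
            have hder2 : derivB ((n / d.toNat : Nat) : Int) = DD (n / d.toNat) := derivB_spec _
            by_cases hne : d.toNat ≠ n / d.toNat
            · rw [if_pos (by rw [← hcast]; exact_mod_cast (by exact_mod_cast hne : ¬ ((d.toNat : Int) = ((n / d.toNat : Nat) : Int))))]
              rw [hder1, hder2, bodyB, if_pos hdvd, if_pos hne]
              ring
            · push_neg at hne
              rw [if_neg (by rw [← hcast]; simp only [ne_eq, not_not, Nat.cast_inj]; exact_mod_cast hne), hder1]
              rw [bodyB, if_pos hdvd, if_neg (not_ne_iff.2 hne)]
              ring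
          · have hmod : (PySem.Int.mod (n : Int) d == 0) = false := by
              simp only [beq_eq_false_iff_ne, ne_eq, PySem.Int.mod_eq_zero_iff_dvd]
              intro hc
              exact hdvd (by
                rw [← Int.natCast_dvd_natCast]
                exact hcast ▸ hc)
            rw [hmod, if_neg (by simp)]
            rw [bodyB, if_neg hdvd]
            ring_nf
        rw [hbody]
        ring
      · rw [divLoopB, dif_neg h]
        have hgt : n < d.toNat * d.toNat := by
          have h1 : (n : Int) < d * d := by omega
          have hcast : ((d.toNat : Nat) : Int) = d := by omega
          have : ((n : Nat) : Int) < ((d.toNat * d.toNat : Nat) : Int) := by push_cast; rw [hcast]; omega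
          exact_mod_cast this
        have : n.sqrt < d.toNat := Nat.sqrt_lt.2 hgt
        rw [Finset.Ico_eq_empty (by simp; omega), Finset.sum_empty]
        ring

-- ===== the divisor-pairing identity =====
def SumDiv (n : Nat) : Int := ∑ d ∈ n.divisors, DD d

theorem divisors_eq_filter_Ico (n : Nat) (hn : 1 ≤ n) :
    n.divisors = (Finset.Ico 1 (n + 1)).filter (fun d => d ∣ n) := by
  ext k
  simp only [Nat.mem_divisors, Finset.mem_filter, Finset.mem_Ico]
  constructor
  · rintro ⟨hk, -⟩
    have h1 : 1 ≤ k := Nat.pos_of_dvd_of_pos hk (by omega)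
    have h2 : k ≤ n := Nat.le_of_dvd (by omega) hk
    exact ⟨⟨h1, by omega⟩, hk⟩
  · rintro ⟨-, hk⟩
    exact ⟨hk, by omega⟩

theorem pairing (n : Nat) (hn : 1 ≤ n) :
    (∑ k ∈ Finset.Ico 1 (n.sqrt + 1), bodyB n k) = SumDiv n := by
  classical
  have hsmall : (Finset.Ico 1 (n.sqrt + 1)).filter (fun d => d ∣ n) =
      n.divisors.filter (fun d => d * d ≤ n) := by
    ext k
    simp only [Finset.mem_filter, Finset.mem_Ico, Nat.mem_divisors]
    constructor
    · rintro ⟨⟨h1, h2⟩, hd⟩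
      exact ⟨⟨hd, by omega⟩, Nat.le_sqrt.1 (by omega)⟩
    · rintro ⟨⟨hd, -⟩, hsq⟩
      have h1 : 1 ≤ k := Nat.pos_of_dvd_of_pos hd (by omega)
      exact ⟨⟨h1, by have := Nat.le_sqrt.2 hsq; omega⟩, hd⟩
  have hstep1 : (∑ k ∈ Finset.Ico 1 (n.sqrt + 1), bodyB n k) =
      ∑ k ∈ n.divisors.filter (fun d => d * d ≤ n), (DD k + if k ≠ n / k then DD (n / k) else 0) := by
    rw [← hsmall]
    rw [Finset.sum_filter]
    apply Finset.sum_congr rfl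
    intro k _
    rw [bodyB]
  rw [hstep1]
  rw [Finset.sum_add_distrib]
  have hpair : (∑ k ∈ n.divisors.filter (fun d => d * d ≤ n), if k ≠ n / k then DD (n / k) else 0) =
      ∑ k ∈ n.divisors.filter (fun d => ¬ d * d ≤ n), DD k := by
    rw [← Finset.sum_filter]
    rw [Finset.filter_filter]
    apply Finset.sum_nbij' (fun k => n / k) (fun k => n / k)
    · intro a ha
      simp only [Finset.mem_filter, Nat.mem_divisors] at ha ⊢
      obtain ⟨⟨had, hne0⟩, hsq, hane⟩ := ha
      have ha1 : 1 ≤ a := Nat.pos_of_dvd_of_pos had (by omega)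
      refine ⟨⟨Nat.div_dvd_of_dvd had, hne0⟩, ?_⟩
      intro hc
      have hmul : a * (n / a) = n := Nat.mul_div_cancel' had
      have hd1 : 1 ≤ n / a := Nat.pos_of_dvd_of_pos (Nat.div_dvd_of_dvd had) (by omega)
      have h1 : n / a ≤ a := by nlinarith
      have h2 : a ≤ n / a := by nlinarith
      omega
    · intro a ha
      simp only [Finset.mem_filter, Nat.mem_divisors] at ha ⊢
      obtain ⟨⟨had, hne0⟩, hsq⟩ := ha
      have ha1 : 1 ≤ a := Nat.pos_of_dvd_of_pos had (by omega)
      have hmul : a * (n / a) = n := Nat.mul_div_cancel' had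
      have hd1 : 1 ≤ n / a := Nat.pos_of_dvd_of_pos (Nat.div_dvd_of_dvd had) (by omega)
      have hdsq : (n / a) * (n / a) ≤ n := by nlinarith
      refine ⟨⟨Nat.div_dvd_of_dvd had, hne0⟩, hdsq, ?_⟩
      rw [Nat.div_div_self had hne0]
      intro hc
      nlinarith
    · intro a ha
      simp only [Finset.mem_filter, Nat.mem_divisors] at ha
      exact Nat.div_div_self ha.1.1 ha.1.2
    · intro a ha
      simp only [Finset.mem_filter, Nat.mem_divisors] at ha
      exact Nat.div_div_self ha.1.1 ha.1.2
    · intro a _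
      rfl
  rw [hpair, SumDiv]
  rw [Finset.sum_filter_add_sum_filter_not]

-- ===== assembling both programs into the same divisor sum =====
def gA (i : Int) : Int := if 1 ≤ i then SumDiv i.toNat else 0

theorem sum_filter_range_map (n : Nat) (p : Nat → Bool) (f : Nat → Int) :
    (((List.range n).filter p).map f).sum = ∑ k ∈ Finset.range n, (if p k then f k else 0) := by
  induction n with
  | zero => simp
  | succ n ih =>
      rw [List.range_succ, List.filter_append, List.map_append, List.sum_append, ih,
        Finset.sum_range_succ]
      by_cases h : p n
      · simp [h]
      · simp [h]

theorem factors_sum (n : Nat) (hn : 1 ≤ n) :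
    ((factorsA (n : Int)).map (fun j => DD j.toNat)).sum = SumDiv n := by
  rw [factorsA_natCast, List.map_map]
  have hfun : ((fun j : Int => DD j.toNat) ∘ (fun k : Nat => ((k + 1 : Nat) : Int))) =
      fun k => DD (k + 1) := by
    funext k
    simp [Function.comp]
  rw [hfun, sum_filter_range_map n _ (fun k => DD (k + 1))]
  have hshift : (∑ k ∈ Finset.range n, (if decide ((k + 1) ∣ n) then DD (k + 1) else 0)) =
      ∑ k ∈ Finset.Ico 1 (n + 1), (if k ∣ n then DD k else 0) := by
    rw [Finset.sum_Ico_eq_sum_range]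
    simp only [Nat.add_sub_cancel]
    apply Finset.sum_congr rfl
    intro k _
    rw [show 1 + k = k + 1 by omega]
    simp
  rw [hshift, ← Finset.sum_filter, ← divisors_eq_filter_Ico n hn, SumDiv]

theorem inner_fold_eq (l : List Int) (g : Int → Int)
    (h : ∀ j ∈ l, checkA j.toNat j = some (g j)) : ∀ s : Int,
    l.foldl (fun s j =>
      match s with
      | none => none
      | some sv =>
          match checkA j.toNat j with
          | none => none
          | some c => some (sv + c)) (some s) = some (s + (l.map g).sum) := by
  induction l with
  | nil => intro s; simp
  | cons a t ih =>
      intro s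
      rw [List.foldl_cons]
      have ha := h a (List.mem_cons_self)
      rw [show (match some s with
        | none => none
        | some sv =>
            match checkA a.toNat a with
            | none => none
            | some c => some (sv + c)) = some (s + g a) by rw [ha]]
      rw [ih (fun j hj => h j (List.mem_cons_of_mem _ hj))]
      rw [List.map_cons, List.sum_cons, Option.some_inj]
      ring

theorem inner_value (i : Int) :
    (factorsA i).foldl (fun s j =>
      match s with
      | none => none
      | some sv =>
          match checkA j.toNat j with
          | none => none
          | some c => some (sv + c)) (some (0 : Int)) = some (gA i) := by
  by_cases hi : 1 ≤ i
  · have hn : i = ((i.toNat : Nat) : Int) := by omega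
    have hn1 : 1 ≤ i.toNat := by omega
    rw [hn, inner_fold_eq (factorsA ((i.toNat : Nat) : Int)) (fun j => DD j.toNat) ?mem 0]
    case mem =>
      intro j hj
      rw [factorsA_natCast] at hj
      rcases List.mem_map.1 hj with ⟨k, _, rfl⟩
      have ht : ((k + 1 : Nat) : Int).toNat = k + 1 := by omega
      rw [ht]
      exact checkA_spec (k + 1) (k + 1) (by omega) (le_refl _)
    rw [factors_sum i.toNat hn1, gA, if_pos (by omega), zero_add, Int.toNat_natCast]
  · rw [factorsA_nonpos i (by omega), List.foldl_nil, gA, if_neg hi]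

theorem outer_fold_eq (l : List Int) : ∀ t : Int,
    l.foldl (fun t i =>
      match t with
      | none => none
      | some tv =>
          match (factorsA i).foldl
              (fun s j =>
                match s with
                | none => none
                | some sv =>
                    match checkA j.toNat j with
                    | none => none
                    | some c => some (sv + c)) (some (0 : Int)) with
          | none => none
          | some sv => some (tv + sv)) (some t) = some (t + (l.map gA).sum) := by
  induction l with
  | nil => intro t; simp
  | cons a tl ih =>
      intro t
      rw [List.foldl_cons]
      rw [show (match some t with
        | none => none
        | some tv =>
            match (factorsA a).foldl
                (fun s j =>
                  match s with
                  | none => none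
                  | some sv =>
                      match checkA j.toNat j with
                      | none => none
                      | some c => some (sv + c)) (some (0 : Int)) with
            | none => none
            | some sv => some (tv + sv)) = some (t + gA a) by rw [inner_value a]]
      rw [ih, List.map_cons, List.sum_cons, Option.some_inj]
      ring

theorem strange_sum_eq_sum (L R : Int) :
    strange_sum L R = ((PySem.List.pyRange L (R + 1) 1).map gA).sum := by
  rw [strange_sum, outer_fold_eq _ 0]
  simp [Option.getD]

theorem strange_sum_alt_eq_sum (L R : Int) :
    strange_sum_alt L R = ((PySem.List.pyRange (max L 1) (R + 1) 1).map gA).sum := by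
  rw [strange_sum_alt]
  have hcg := PySem.List.foldl_congr_mem (l := PySem.List.pyRange (max L 1) (R + 1) 1)
    (init := (0 : Int)) (f := fun t i => divLoopB i 1 t) (g := fun t i => t + gA i) ?h
  case h =>
    intro acc i hi
    have hi1 : 1 ≤ i := le_trans (le_max_right L 1) (PySem.List.mem_pyRange_one.1 hi).1
    have hcast : i = ((i.toNat : Nat) : Int) := by omega
    show divLoopB i 1 acc = acc + gA i
    rw [hcast, divLoopB_spec i.toNat ((((i.toNat : Nat) : Int) + 1 - 1).toNat) 1 rfl (by omega) acc]
    rw [show (1 : Int).toNat = 1 from rfl, pairing i.toNat (by omega), gA,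
      if_pos (by omega : (1 : Int) ≤ ((i.toNat : Nat) : Int))]
    rw [Int.toNat_natCast]
  rw [hcg, PySem.List.foldl_add]
  simp

theorem sum_trim (L R : Int) :
    ((PySem.List.pyRange L (R + 1) 1).map gA).sum =
      ((PySem.List.pyRange (max L 1) (R + 1) 1).map gA).sum := by
  rcases (by omega : 1 ≤ L ∨ L < 1) with hL | hL
  · rw [max_eq_left hL]
  · -- L ≤ 0
    have hmax : max L 1 = 1 := max_eq_right (by omega)
    rw [hmax]
    obtain ⟨m, hm⟩ : ∃ m, (1 - L).toNat = m := ⟨_, rfl⟩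
    induction m generalizing L with
    | zero => omega
    | succ m ih =>
        rcases (by omega : R + 1 ≤ L ∨ L < R + 1) with hR | hR
        · rw [PySem.List.pyRange_one_eq_nil hR, PySem.List.pyRange_one_eq_nil (by omega)]
        · rw [PySem.List.pyRange_one_cons hR, List.map_cons, List.sum_cons]
          rw [show gA L = 0 by rw [gA, if_neg (by omega)]]
          rw [zero_add]
          rcases (by omega : 1 ≤ L + 1 ∨ L + 1 < 1) with hL1 | hL1
          · rw [show L + 1 = 1 by omega]
          · exact ih (L + 1) (by omega) (by omega) (by omega)

-- ===== VERDICT (by name: the statement is the Claim_ definition above) =====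
theorem strange_sum_spec : Claim_equal_strange_sum := by
  intro L R _
  show strange_sum L R = strange_sum_alt L R
  rw [strange_sum_eq_sum, strange_sum_alt_eq_sum, sum_trim]
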